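-- pv_equiv track=rewrite | github.com/bipulsin/trademanthan | backend/services/fin_sentiment_reason_openai.py | index_latest_nse_row_by_symbol
-- ===== SOURCE A (Python) =====
-- from typing import Any, Dict, List, Optional
--
-- def index_latest_nse_row_by_symbol(rows: List[Dict[str, Any]]) -> Dict[str, Dict[str, Any]]:
--     """Pick most recent raw NSE row per symbol from a corporate-announcements payload."""
--     by_sym: Dict[str, List[Dict[str, Any]]] = {}
--     for r in rows:
--         if not isinstance(r, dict):
--             continue
--         sym = (r.get("symbol") or "").strip().upper()
--         if not sym:
--             continue
--         by_sym.setdefault(sym, []).append(r)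
--
--     def sort_key(r: Dict[str, Any]) -> str:
--         return str(r.get("sort_date") or r.get("an_dt") or "")
--
--     out: Dict[str, Dict[str, Any]] = {}
--     for sym, cand in by_sym.items():
--         cand.sort(key=sort_key, reverse=True)
--         out[sym] = cand[0]
--     return out
-- ===== SOURCE B (Python) =====
-- from typing import Any, Dict, List
--
-- def index_latest_nse_row_by_symbol(rows: List[Dict[str, Any]]) -> Dict[str, Dict[str, Any]]:
--     """Single pass: keep, per symbol, the first row with the maximal sort key."""
--     def sort_key(r: Dict[str, Any]) -> str:
--         return str(r.get("sort_date") or r.get("an_dt") or "")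
--
--     best: Dict[str, Dict[str, Any]] = {}
--     for r in rows:
--         if not isinstance(r, dict):
--             continue
--         sym = (r.get("symbol") or "").strip().upper()
--         if not sym:
--             continue
--         cur = best.get(sym)
--         if cur is None or sort_key(cur) < sort_key(r):
--             best[sym] = r
--     return best
-- ===== Notes on version B (the rewrite author's own statement) =====
-- stated objective: alternative
-- what changed: Instead of grouping rows per symbol and reverse-sorting each group to take its head, B makes one pass keeping, per symbol, the first row with the maximal sort key (strict '<' replacement preserves Python's stable reverse-sort tie-breaking).
import Mathlib
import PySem

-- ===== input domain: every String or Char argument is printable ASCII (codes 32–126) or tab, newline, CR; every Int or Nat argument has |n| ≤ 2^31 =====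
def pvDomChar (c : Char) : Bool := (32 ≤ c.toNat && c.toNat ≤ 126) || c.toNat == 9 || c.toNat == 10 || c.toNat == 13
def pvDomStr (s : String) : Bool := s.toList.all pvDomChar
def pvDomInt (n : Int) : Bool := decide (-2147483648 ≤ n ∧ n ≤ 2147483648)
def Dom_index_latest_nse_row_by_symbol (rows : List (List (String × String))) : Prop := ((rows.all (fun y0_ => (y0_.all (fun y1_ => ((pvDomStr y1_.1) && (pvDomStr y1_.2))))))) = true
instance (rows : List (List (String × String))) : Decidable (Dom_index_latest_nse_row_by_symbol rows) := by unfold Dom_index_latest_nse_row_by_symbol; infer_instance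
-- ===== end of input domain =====

-- B replaces A's group-then-reverse-sort-each-group with a single pass keeping the first
-- row with the maximal sort key per symbol (objective: alternative single-pass algorithm).

-- Shared helpers: both Pythons compute the symbol and the sort key by the very same expressions.
-- sym = (r.get("symbol") or "").strip().upper()   ('or ""' collapses None and "" to "", = getD "")
def pvSym (r : List (String × String)) : String :=
  PySem.Str.upper (PySem.Str.strip (((PySem.Dict.mk r).get? "symbol").getD ""))

-- sort_key(r) = str(r.get("sort_date") or r.get("an_dt") or "")  (values are strings, str = id)
def pvSortKey (r : List (String × String)) : String :=
  let v1 := ((PySem.Dict.mk r).get? "sort_date").getD ""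
  if v1 ≠ "" then v1 else ((PySem.Dict.mk r).get? "an_dt").getD ""

-- ===== PORT A =====
-- 'isinstance(r, dict)' is always true under the type convention.
-- 'by_sym.setdefault(sym, []).append(r)' is Dict.modify sym [] (· ++ [r]) (same position semantics).
-- 'cand.sort(key=sort_key, reverse=True); out[sym] = cand[0]': cand is never empty (one append per
-- entry), so the [] branch of the match is unreachable — a totality guard only.
def index_latest_nse_row_by_symbol (rows : List (List (String × String))) : List (String × List (String × String)) :=
  let bySym : PySem.Dict String (List (List (String × String))) :=
    rows.foldl (fun d r =>
      let sym := pvSym r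
      if sym = "" then d else d.modify sym [] (· ++ [r])) PySem.Dict.empty
  let out : PySem.Dict String (List (String × String)) :=
    bySym.items.foldl (fun o p =>
      match PySem.List.sorted p.2 pvSortKey true with
      | [] => o
      | m :: _ => o.insert p.1 m) PySem.Dict.empty
  out.items

-- ===== PORT B =====
def index_latest_nse_row_by_symbol_alt (rows : List (List (String × String))) : List (String × List (String × String)) :=
  (rows.foldl (fun d r =>
    let sym := pvSym r
    if sym = "" then d else
      match d.get? sym with
      | none => d.insert sym r
      | some cur => if pvSortKey cur < pvSortKey r then d.insert sym r else d)
    (PySem.Dict.empty : PySem.Dict String (List (String × String)))).items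

-- ===== PRECONDITION & SPEC =====
def Spec_index_latest_nse_row_by_symbol (rows : List (List (String × String))) (out : List (String × List (String × String))) : Prop := out = index_latest_nse_row_by_symbol_alt rows
instance (rows : List (List (String × String))) (out : List (String × List (String × String))) : Decidable (Spec_index_latest_nse_row_by_symbol rows out) := by unfold Spec_index_latest_nse_row_by_symbol; infer_instance

-- ===== CLAIM (what is proved, stated in full; the proofs are below) =====
def Claim_equal_index_latest_nse_row_by_symbol : Prop := ∀ (rows : List (List (String × String))), Dom_index_latest_nse_row_by_symbol rows → Spec_index_latest_nse_row_by_symbol rows (index_latest_nse_row_by_symbol rows)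

-- ===== LEMMAS AND PROOFS =====

-- The value B keeps per symbol, as a function of A's group for that symbol.
def pvPick (cand : List (List (String × String))) : List (String × String) :=
  (PySem.List.max? cand pvSortKey).getD []

def pvF (p : String × List (List (String × String))) : String × List (String × String) :=
  (p.1, pvPick p.2)

theorem pv_max?_append_singleton {α κ : Type} [LT κ] [DecidableLT κ] (xs : List α) (x : α) (key : α → κ) :
    PySem.List.max? (xs ++ [x]) key =
      match PySem.List.max? xs key with
      | none => some x
      | some m => if key m < key x then some x else some m := by
  simp only [PySem.List.max?, List.foldl_append, List.foldl_cons, List.foldl_nil]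
  rfl

-- head of Python's stable reverse sort = Python's max(xs, key) (first maximal element)
theorem pv_head_sorted_rev_eq_max? {α κ : Type} [LinearOrder κ] (xs : List α) (key : α → κ) :
    (PySem.List.sorted xs key true).head? = PySem.List.max? xs key := by
  rw [PySem.List.sorted_rev_eq_foldl_insertBy]
  induction xs using List.reverseRecOn with
  | nil => rfl
  | append_singleton ys x ih =>
    rw [List.foldl_append, pv_max?_append_singleton]
    simp only [List.foldl_cons, List.foldl_nil]
    cases hs : List.foldl (fun acc x => PySem.List.insertBy (fun a b => decide (key b < key a)) x acc) [] ys with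
    | nil =>
      rw [hs] at ih
      simp only [List.head?] at ih
      simp [PySem.List.insertBy, ← ih]
    | cons m t =>
      rw [hs] at ih
      simp only [List.head?] at ih
      rw [← ih]
      simp only [PySem.List.insertBy]
      by_cases h : key m < key x
      · simp [h]
      · simp [h]

-- one step of A's grouping loop / B's running-max loop, names for readability
def pvStepA (d : PySem.Dict String (List (List (String × String)))) (r : List (String × String)) :
    PySem.Dict String (List (List (String × String))) :=
  let sym := pvSym r
  if sym = "" then d else d.modify sym [] (· ++ [r])

def pvStepB (d : PySem.Dict String (List (String × String))) (r : List (String × String)) :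
    PySem.Dict String (List (String × String)) :=
  let sym := pvSym r
  if sym = "" then d else
    match d.get? sym with
    | none => d.insert sym r
    | some cur => if pvSortKey cur < pvSortKey r then d.insert sym r else d

theorem pv_get?_map_F (d : PySem.Dict String (List (List (String × String))))
    (D : PySem.Dict String (List (String × String))) (h : D.items = d.items.map pvF) (s : String) :
    D.get? s = (d.get? s).map pvPick := by
  simp only [PySem.Dict.get?, h, List.find?_map]
  have : ((fun p => p.1 == s) ∘ pvF) = (fun (p : String × List (List (String × String))) => p.1 == s) := by
    funext p; rfl
  rw [this]
  cases List.find? (fun p => p.1 == s) d.items <;> rfl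

-- coupling invariant between A's grouping dict and B's running-best dict
set_option maxHeartbeats 1000000 in
theorem pv_loop_inv (rows : List (List (String × String)))
    (d : PySem.Dict String (List (List (String × String))))
    (D : PySem.Dict String (List (String × String)))
    (hnd : d.keys.Nodup) (hne : ∀ p ∈ d.items, p.2 ≠ []) (hF : D.items = d.items.map pvF) :
    (rows.foldl pvStepA d).keys.Nodup ∧
    (∀ p ∈ (rows.foldl pvStepA d).items, p.2 ≠ []) ∧
    (rows.foldl pvStepB D).items = (rows.foldl pvStepA d).items.map pvF := by
  induction rows generalizing d D with
  | nil => exact ⟨hnd, hne, hF⟩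
  | cons r rows ih =>
    simp only [List.foldl_cons]
    by_cases hs : pvSym r = ""
    · have hA : pvStepA d r = d := by simp [pvStepA, hs]
      have hB : pvStepB D r = D := by simp [pvStepB, hs]
      rw [hA, hB]; exact ih d D hnd hne hF
    · have hgB : D.get? (pvSym r) = (d.get? (pvSym r)).map pvPick := pv_get?_map_F d D hF _
      cases hg : d.get? (pvSym r) with
      | none =>
        have hc : d.contains (pvSym r) = false := by
          rw [PySem.Dict.contains_eq_isSome_get?, hg]; rfl
        have hcD : D.contains (pvSym r) = false := by
          rw [PySem.Dict.contains_eq_isSome_get?, hgB, hg]; rfl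
        have hA : pvStepA d r = d.insert (pvSym r) [r] := by
          simp [pvStepA, hs, PySem.Dict.modify, PySem.Dict.getD_eq_get?_getD, hg]
        have hB : pvStepB D r = D.insert (pvSym r) r := by
          simp [pvStepB, hs, hgB, hg]
        rw [hA, hB]
        apply ih
        · exact PySem.Dict.nodup_keys_insert d _ _ hnd
        · intro p hp
          rw [PySem.Dict.items_insert_of_not_contains d _ hc] at hp
          rcases List.mem_append.mp hp with h | h
          · exact hne p h
          · simp only [List.mem_singleton] at h; subst h; simp
        · rw [PySem.Dict.items_insert_of_not_contains d _ hc,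
              PySem.Dict.items_insert_of_not_contains D _ hcD, hF, List.map_append]
          rfl
      | some cand =>
        have hmem : (pvSym r, cand) ∈ d.items := by
          have hg' := hg
          simp only [PySem.Dict.get?, Option.map_eq_some_iff] at hg'
          obtain ⟨⟨q1, q2⟩, hq, hq2⟩ := hg'
          have hq1 : q1 = pvSym r := by simpa using List.find?_some hq
          simp only at hq2
          subst hq1; subst hq2
          exact List.mem_of_find?_eq_some hq
        have hcandne : cand ≠ [] := hne _ hmem
        have hc : d.contains (pvSym r) = true := by
          rw [PySem.Dict.contains_eq_isSome_get?, hg]; rfl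
        have hcD : D.contains (pvSym r) = true := by
          rw [PySem.Dict.contains_eq_isSome_get?, hgB, hg]; rfl
        obtain ⟨m, hm⟩ : ∃ m, PySem.List.max? cand pvSortKey = some m := by
          cases hmx : PySem.List.max? cand pvSortKey with
          | none => exact absurd ((PySem.List.max?_eq_none_iff cand pvSortKey).mp hmx) hcandne
          | some m => exact ⟨m, rfl⟩
        have hpick : pvPick cand = m := by simp [pvPick, hm]
        have hpicknew : pvPick (cand ++ [r]) =
            (if pvSortKey m < pvSortKey r then r else m) := by
          simp only [pvPick, pv_max?_append_singleton, hm]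
          by_cases h : pvSortKey m < pvSortKey r <;> simp [h]
        have hA : pvStepA d r = d.insert (pvSym r) (cand ++ [r]) := by
          simp [pvStepA, hs, PySem.Dict.modify, PySem.Dict.getD_eq_get?_getD, hg]
        have hitemsA : (d.insert (pvSym r) (cand ++ [r])).items =
            d.items.map (fun p => if p.1 == pvSym r then (pvSym r, cand ++ [r]) else p) :=
          PySem.Dict.items_insert_of_contains d _ hc
        -- mapping pvF over the in-place update; Nodup keys pin the updated entry to (sym, cand)
        have hmapF :
            (d.items.map (fun p => if p.1 == pvSym r then (pvSym r, cand ++ [r]) else p)).map pvF =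
            d.items.map (fun p => if p.1 == pvSym r then (pvSym r, pvPick (cand ++ [r])) else pvF p) := by
          rw [List.map_map]
          apply List.map_congr_left
          intro p _
          by_cases h : p.1 = pvSym r <;> simp [Function.comp, pvF, h]
        have hinsB : (D.insert (pvSym r) r).items =
            d.items.map (fun p => if p.1 == pvSym r then (pvSym r, r) else pvF p) := by
          rw [PySem.Dict.items_insert_of_contains D _ hcD, hF, List.map_map]
          apply List.map_congr_left
          intro p _
          by_cases h : p.1 = pvSym r <;> simp [Function.comp, pvF, h]
        have hkeep : D.items =
            d.items.map (fun p => if p.1 == pvSym r then (pvSym r, m) else pvF p) := by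
          rw [hF]
          apply List.map_congr_left
          rintro ⟨p1, p2⟩ hp
          by_cases h : p1 = pvSym r
          · have hgp : d.get? p1 = some p2 := PySem.Dict.get?_of_mem_items d hp hnd
            rw [h, hg] at hgp
            have hp2 : p2 = cand := (Option.some.inj hgp).symm
            simp [pvF, h, hp2, hpick]
          · simp [h]
        have hne' : ∀ p ∈ (d.insert (pvSym r) (cand ++ [r])).items, p.2 ≠ [] := by
          intro p hp
          rw [hitemsA] at hp
          obtain ⟨q, hq, hqe⟩ := List.mem_map.mp hp
          by_cases h : q.1 == pvSym r
          · rw [if_pos h] at hqe; rw [← hqe]; simp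
          · rw [if_neg h] at hqe; rw [← hqe]; exact hne q hq
        by_cases hlt : pvSortKey m < pvSortKey r
        · have hB : pvStepB D r = D.insert (pvSym r) r := by
            simp [pvStepB, hs, hgB, hg, hpick, hlt]
          rw [hA, hB]
          apply ih
          · exact PySem.Dict.nodup_keys_insert d _ _ hnd
          · exact hne'
          · rw [hitemsA, hmapF, hinsB]
            apply List.map_congr_left
            intro p _
            by_cases h : p.1 = pvSym r <;> simp [h, hpicknew, hlt]
        · have hB : pvStepB D r = D := by
            simp [pvStepB, hs, hgB, hg, hpick, hlt]
          rw [hA, hB]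
          apply ih
          · exact PySem.Dict.nodup_keys_insert d _ _ hnd
          · exact hne'
          · rw [hitemsA, hmapF, hkeep]
            apply List.map_congr_left
            intro p _
            by_cases h : p.1 = pvSym r <;> simp [h, hpicknew, hlt]

-- ===== VERDICT (by name: the statement is the Claim_ definition above) =====
theorem index_latest_nse_row_by_symbol_spec : Claim_equal_index_latest_nse_row_by_symbol := by
  intro rows _
  unfold Spec_index_latest_nse_row_by_symbol
  unfold index_latest_nse_row_by_symbol index_latest_nse_row_by_symbol_alt
  simp only []
  obtain ⟨hnd, hne, hF⟩ :=
    pv_loop_inv rows PySem.Dict.empty PySem.Dict.empty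
      PySem.Dict.nodup_keys_empty (by intro p hp; cases hp) rfl
  set bySym := rows.foldl pvStepA PySem.Dict.empty with hby
  have hfoldA : rows.foldl
      (fun d r => let sym := pvSym r; if sym = "" then d else d.modify sym [] (· ++ [r]))
      PySem.Dict.empty = bySym := rfl
  have hfoldB : rows.foldl
      (fun d r => let sym := pvSym r;
        if sym = "" then d else
          match d.get? sym with
          | none => d.insert sym r
          | some cur => if pvSortKey cur < pvSortKey r then d.insert sym r else d)
      (PySem.Dict.empty : PySem.Dict String (List (String × String))) = rows.foldl pvStepB PySem.Dict.empty := rfl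
  rw [hfoldA, hfoldB]
  -- replace A's second loop body by a plain insert (each group is nonempty)
  have hbody : bySym.items.foldl (fun o p =>
      match PySem.List.sorted p.2 pvSortKey true with
      | [] => o
      | m :: _ => o.insert p.1 m) PySem.Dict.empty
      = bySym.items.foldl (fun o p => o.insert p.1 (pvPick p.2)) PySem.Dict.empty := by
    apply PySem.List.foldl_congr_mem
    intro o p hp
    have hpne : p.2 ≠ [] := hne p hp
    cases hsrt : PySem.List.sorted p.2 pvSortKey true with
    | nil => exact absurd ((PySem.List.sorted_eq_nil_iff p.2 pvSortKey true).mp hsrt) hpne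
    | cons m t =>
      have : PySem.List.max? p.2 pvSortKey = some m := by
        rw [← pv_head_sorted_rev_eq_max? p.2 pvSortKey, hsrt]; rfl
      simp [pvPick, this]
  rw [hbody]
  rw [PySem.Dict.items_foldl_insert_fresh bySym.items (fun p => p.1) (fun p => pvPick p.2)
        PySem.Dict.empty (by intro a _; rfl) hnd]
  rw [hF]
  rfl
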